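-- pv_equiv track=rewrite | github.com/Deanhz/normal_works | 算法书/程序员面试指南/python/栈和队列/找到每个元素左右第一个大的数.py | findLeft_rigt_firstBig
-- ===== SOURCE A (Python) =====
-- def findLeft_rigt_firstBig(data):
--     lbigMap = {}
--     rbigMap = {}
--     stack = []
--     length = len(data)
--     for i in range(length):
--         while(stack and data[stack[-1]] < data[i]):
--             stack.pop()
--         if stack:
--             lbigMap[i] = stack[-1]
--         stack.append(i)
--
--     while stack:
--         stack.pop()
--
--     for i in range(length)[::-1]:
--         while(stack and data[stack[-1]] < data[i]):
--             stack.pop()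
--         if stack:
--             rbigMap[i] = stack[-1]
--         stack.append(i)
--     return lbigMap, rbigMap
-- ===== SOURCE B (Python) =====
-- def findLeft_rigt_firstBig(data):
--     length = len(data)
--     lbigMap = {}
--     rbigMap = {}
--     for i in range(length):
--         for j in reversed(range(i)):
--             if data[j] >= data[i]:
--                 lbigMap[i] = j
--                 break
--     for i in reversed(range(length)):
--         for j in range(i + 1, length):
--             if data[j] >= data[i]:
--                 rbigMap[i] = j
--                 break
--     return lbigMap, rbigMap
-- ===== Notes on version B (the rewrite author's own statement) =====
-- stated objective: simpler
-- what changed: Replaced the two monotonic-stack passes by direct nested scans: for each index, scan left (right) for the first neighbour with value >= data[i]; no stack is maintained.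
import Mathlib
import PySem

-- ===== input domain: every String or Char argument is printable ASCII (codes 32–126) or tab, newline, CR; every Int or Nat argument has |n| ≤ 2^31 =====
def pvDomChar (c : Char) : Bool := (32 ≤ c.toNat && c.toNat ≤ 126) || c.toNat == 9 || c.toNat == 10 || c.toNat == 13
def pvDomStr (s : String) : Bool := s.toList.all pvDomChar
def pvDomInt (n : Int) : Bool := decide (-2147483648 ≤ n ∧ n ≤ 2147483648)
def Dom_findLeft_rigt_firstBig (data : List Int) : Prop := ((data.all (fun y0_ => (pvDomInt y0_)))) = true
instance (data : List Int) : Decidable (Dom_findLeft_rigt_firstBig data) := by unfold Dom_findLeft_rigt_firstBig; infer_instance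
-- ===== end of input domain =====

-- B replaces the monotonic-stack passes by plain nested left/right scans (simpler, no stack); equal return value proved on all inputs.

-- ===== PORT A =====
-- 'while stack and data[stack[-1]] < data[i]: stack.pop()' — the stack is kept top-first (push = cons, stack[-1] = head).
-- data[t] is in range on every access (all stacked indices come from range(len(data))), so pyGetD is exact here.
def pvPopA (data : List Int) (x : Int) : List Int → List Int
  | [] => []
  | t :: rest => if PySem.List.pyGetD data t 0 < x then pvPopA data x rest else t :: rest

-- one iteration of either of A's loops: pop, record stack[-1] if any, push i
def pvStepA (data : List Int) (st : PySem.Dict Int Int × List Int) (i : Int) : PySem.Dict Int Int × List Int :=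
  let s := pvPopA data (PySem.List.pyGetD data i 0) st.2
  let m := match s with
    | [] => st.1
    | t :: _ => st.1.insert i t
  (m, i :: s)

def findLeft_rigt_firstBig (data : List Int) : (List (Int × Int)) × (List (Int × Int)) :=
  let length : Int := data.length
  let resL := (PySem.List.pyRange 0 length 1).foldl (pvStepA data) ((PySem.Dict.empty : PySem.Dict Int Int), [])
  -- 'while stack: stack.pop()' empties the stack, so the second loop starts from [];
  -- 'range(length)[::-1]' is the reversed range (PySem.List.slice?_none_none_neg_one)
  let resR := ((PySem.List.pyRange 0 length 1).reverse).foldl (pvStepA data) ((PySem.Dict.empty : PySem.Dict Int Int), [])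
  (resL.1.items, resR.1.items)

-- ===== PORT B =====
-- B's inner 'for j in js: if data[j] >= data[i]: map[i] = j; break' = first qualifying j, else leave the map alone
def pvScanB (data : List Int) (m : PySem.Dict Int Int) (i : Int) (js : List Int) : PySem.Dict Int Int :=
  match js.find? (fun j => decide (PySem.List.pyGetD data i 0 ≤ PySem.List.pyGetD data j 0)) with
  | some j => m.insert i j
  | none => m

def findLeft_rigt_firstBig_alt (data : List Int) : (List (Int × Int)) × (List (Int × Int)) :=
  let length : Int := data.length
  -- 'reversed(range(i))' / 'reversed(range(length))' are the reversed ranges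
  let l := (PySem.List.pyRange 0 length 1).foldl
    (fun m i => pvScanB data m i ((PySem.List.pyRange 0 i 1).reverse)) (PySem.Dict.empty : PySem.Dict Int Int)
  let r := ((PySem.List.pyRange 0 length 1).reverse).foldl
    (fun m i => pvScanB data m i (PySem.List.pyRange (i + 1) length 1)) (PySem.Dict.empty : PySem.Dict Int Int)
  (l.items, r.items)

-- ===== PRECONDITION & SPEC =====
def Spec_findLeft_rigt_firstBig (data : List Int) (out : (List (Int × Int)) × (List (Int × Int))) : Prop := out = findLeft_rigt_firstBig_alt data
instance (data : List Int) (out : (List (Int × Int)) × (List (Int × Int))) : Decidable (Spec_findLeft_rigt_firstBig data out) := by unfold Spec_findLeft_rigt_firstBig; infer_instance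

-- ===== CLAIM (what is proved, stated in full; the proofs are below) =====
def Claim_equal_findLeft_rigt_firstBig : Prop := ∀ (data : List Int), Dom_findLeft_rigt_firstBig data → Spec_findLeft_rigt_firstBig data (findLeft_rigt_firstBig data)

-- ===== LEMMAS AND PROOFS =====

-- the stack A holds after processing the indices of `seen` (most recent first), as a function of `seen`
def pvStk (data : List Int) : List Int → List Int
  | [] => []
  | i :: rest => i :: pvPopA data (PySem.List.pyGetD data i 0) (pvStk data rest)

-- popping with a larger threshold absorbs an earlier pop
theorem pvPopA_pvPopA (data : List Int) (v w : Int) (hw : w ≤ v) :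
    ∀ st : List Int, pvPopA data v (pvPopA data w st) = pvPopA data v st := by
  intro st
  induction st with
  | nil => rfl
  | cons t rest ih =>
    by_cases h : PySem.List.pyGetD data t 0 < w
    · simp [pvPopA, h, ih, lt_of_lt_of_le h hw]
    · simp [pvPopA, h]

-- the stack's top after popping below v is the first seen index with value ≥ v
theorem head_pvPopA_pvStk (data : List Int) (v : Int) :
    ∀ seen : List Int, (pvPopA data v (pvStk data seen)).head? =
      seen.find? (fun j => decide (v ≤ PySem.List.pyGetD data j 0)) := by
  intro seen
  induction seen with
  | nil => rfl
  | cons i rest ih =>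
    by_cases h : PySem.List.pyGetD data i 0 < v
    · have hv : ¬ v ≤ PySem.List.pyGetD data i 0 := not_le.mpr h
      simp [pvStk, pvPopA, h, hv, pvPopA_pvPopA data v (PySem.List.pyGetD data i 0) (le_of_lt h), ih]
    · have hv : v ≤ PySem.List.pyGetD data i 0 := not_lt.mp h
      simp [pvStk, pvPopA, h, hv]

-- B's per-step state when the scan list is made explicit: (map, indices seen so far, most recent first)
def pvGenB (data : List Int) (st : PySem.Dict Int Int × List Int) (i : Int) : PySem.Dict Int Int × List Int :=
  (pvScanB data st.1 i st.2, i :: st.2)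

-- A's fold = B's generic fold: the stack is pvStk of the seen list, and each step records the same entry
theorem foldA_eq_foldGenB (data : List Int) :
    ∀ (ps : List Int) (m : PySem.Dict Int Int) (seen : List Int),
      ps.foldl (pvStepA data) (m, pvStk data seen) =
        ((ps.foldl (pvGenB data) (m, seen)).1, pvStk data (ps.foldl (pvGenB data) (m, seen)).2) := by
  intro ps
  induction ps with
  | nil => intro m seen; rfl
  | cons i rest ih =>
    intro m seen
    have hstep : pvStepA data (m, pvStk data seen) i = (pvScanB data m i seen, pvStk data (i :: seen)) := by
      have hh := head_pvPopA_pvStk data (PySem.List.pyGetD data i 0) seen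
      simp only [pvStepA, pvScanB, pvStk]
      cases hs : pvPopA data (PySem.List.pyGetD data i 0) (pvStk data seen) with
      | nil => rw [hs] at hh; simp at hh; simp [← hh]
      | cons t r => rw [hs] at hh; simp at hh; simp [← hh]
    simp only [List.foldl_cons, hstep]
    exact ih (pvScanB data m i seen) (i :: seen)

-- left pass: folding pvGenB over 0..k-1 from the empty seen list is B's left fold, and seen ends as the reversed range
theorem foldGenB_left (data : List Int) :
    ∀ (k : Nat) (m : PySem.Dict Int Int),
      (PySem.List.pyRange 0 (k : Int) 1).foldl (pvGenB data) (m, []) =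
        ((PySem.List.pyRange 0 (k : Int) 1).foldl
            (fun m i => pvScanB data m i ((PySem.List.pyRange 0 i 1).reverse)) m,
          (PySem.List.pyRange 0 (k : Int) 1).reverse) := by
  intro k
  induction k with
  | zero => intro m; simp [PySem.List.pyRange_one_eq_nil]
  | succ k ih =>
    intro m
    have hsplit : PySem.List.pyRange 0 ((k + 1 : Nat) : Int) 1 =
        PySem.List.pyRange 0 (k : Int) 1 ++ [(k : Int)] := by
      push_cast
      exact PySem.List.pyRange_one_succ_right (by positivity)
    rw [hsplit]
    simp only [List.foldl_append, List.foldl_cons, List.foldl_nil, ih m]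
    simp [pvGenB]

-- right pass: folding pvGenB over k-1..0 with seen = [k..n-1] is B's right fold
theorem foldGenB_right (data : List Int) (n : Int) :
    ∀ (k : Nat) (m : PySem.Dict Int Int), (k : Int) ≤ n →
      ((PySem.List.pyRange 0 (k : Int) 1).reverse).foldl (pvGenB data) (m, PySem.List.pyRange (k : Int) n 1) =
        (((PySem.List.pyRange 0 (k : Int) 1).reverse).foldl
            (fun m i => pvScanB data m i (PySem.List.pyRange (i + 1) n 1)) m,
          PySem.List.pyRange 0 n 1) := by
  intro k
  induction k with
  | zero => intro m _; simp [PySem.List.pyRange_one_eq_nil]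
  | succ k ih =>
    intro m hk
    have hsplit : PySem.List.pyRange 0 ((k + 1 : Nat) : Int) 1 =
        PySem.List.pyRange 0 (k : Int) 1 ++ [(k : Int)] := by
      push_cast
      exact PySem.List.pyRange_one_succ_right (by positivity)
    have hcons : PySem.List.pyRange (k : Int) n 1 = (k : Int) :: PySem.List.pyRange ((k : Int) + 1) n 1 := by
      refine PySem.List.pyRange_one_cons ?_
      push_cast at hk; omega
    rw [hsplit]
    simp only [List.reverse_append, List.reverse_cons, List.reverse_nil, List.nil_append,
      List.singleton_append, List.foldl_cons]
    have h1 : pvGenB data (m, PySem.List.pyRange ((k + 1 : Nat) : Int) n 1) (k : Int) =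
        (pvScanB data m (k : Int) (PySem.List.pyRange ((k : Int) + 1) n 1), PySem.List.pyRange (k : Int) n 1) := by
      simp only [pvGenB]
      rw [hcons]; push_cast; rfl
    rw [h1, ih _ (by push_cast at hk ⊢; omega)]

-- ===== VERDICT (by name: the statement is the Claim_ definition above) =====
theorem findLeft_rigt_firstBig_spec : Claim_equal_findLeft_rigt_firstBig := by
  intro data _
  unfold Spec_findLeft_rigt_firstBig findLeft_rigt_firstBig findLeft_rigt_firstBig_alt
  have hnil : PySem.List.pyRange (data.length : Int) (data.length : Int) 1 = ([] : List Int) :=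
    PySem.List.pyRange_one_eq_nil le_rfl
  have hL2 := foldGenB_left data data.length (PySem.Dict.empty : PySem.Dict Int Int)
  have hR2 := foldGenB_right data (data.length : Int) data.length (PySem.Dict.empty : PySem.Dict Int Int) le_rfl
  rw [hnil] at hR2
  have hL := foldA_eq_foldGenB data (PySem.List.pyRange 0 (data.length : Int) 1) (PySem.Dict.empty : PySem.Dict Int Int) []
  have hR := foldA_eq_foldGenB data ((PySem.List.pyRange 0 (data.length : Int) 1).reverse) (PySem.Dict.empty : PySem.Dict Int Int) []
  simp only [pvStk] at hL hR
  rw [hL2] at hL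
  rw [hR2] at hR
  simp only [hL, hR]
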